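-- pv_equiv track=rewrite | github.com/theislab/quicat | src/quicat/cli/extract/pattern_matching.py | _convert_n_to_regex
-- ===== SOURCE A (Python) =====
-- def _convert_n_to_regex(pattern: str) -> str:
--     """
--     Convert 'N' in the pattern to regex equivalents that match sequences of fixed length.
--
--     Args:
--         pattern (str): The input pattern containing 'N'.
--
--     Returns:
--         str: The regex string with 'N' converted to match sequences of fixed length.
--     """
--     # Convert sequences of 'N's into .{count}
--     parts = []
--     count = 0
--     for char in pattern:
--         if char == "N":
--             count += 1
--         else:
--             if count > 0:
--                 parts.append(f".{{{count}}}")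
--                 count = 0
--             parts.append(char)
--     if count > 0:
--         parts.append(f".{{{count}}}")
--     return "".join(parts)
-- ===== SOURCE B (Python) =====
-- import re
--
--
-- def _convert_n_to_regex(pattern: str) -> str:
--     # Single regex substitution: each maximal run of 'N' becomes .{run length}.
--     return re.sub("N+", lambda m: f".{{{len(m.group(0))}}}", pattern)
-- ===== Notes on version B (the rewrite author's own statement) =====
-- stated objective: idiomatic
-- what changed: Replaced the manual count/flush state machine with a single regex substitution whose callback replaces each maximal run of the character N by a dot followed by the run length in braces.
import Mathlib
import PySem

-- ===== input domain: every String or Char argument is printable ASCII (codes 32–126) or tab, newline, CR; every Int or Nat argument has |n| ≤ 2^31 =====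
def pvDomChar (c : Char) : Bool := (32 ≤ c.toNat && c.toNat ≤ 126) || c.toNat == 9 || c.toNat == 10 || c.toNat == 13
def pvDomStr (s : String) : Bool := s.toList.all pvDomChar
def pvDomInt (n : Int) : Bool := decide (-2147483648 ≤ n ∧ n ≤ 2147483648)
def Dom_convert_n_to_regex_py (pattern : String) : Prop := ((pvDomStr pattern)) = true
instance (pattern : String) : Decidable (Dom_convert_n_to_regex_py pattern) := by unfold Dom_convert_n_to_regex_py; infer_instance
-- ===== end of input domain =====

-- B replaces A's manual count/flush state machine by one regex substitution over maximal
-- 'N+' runs (same result, more idiomatic); equivalence is proved for all strings.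

-- ===== PORT A =====
-- one step of A's for-loop over (parts, count)
def convertNStep (st : List String × Int) (c : Char) : List String × Int :=
  if c = 'N' then (st.1, st.2 + 1)
  else
    let parts := if st.2 > 0 then st.1 ++ [".{" ++ PySem.Int.toStr st.2 ++ "}"] else st.1
    (parts ++ [String.ofList [c]], 0)

def convert_n_to_regex_py (pattern : String) : String :=
  let st := pattern.toList.foldl convertNStep ([], 0)
  let parts := if st.2 > 0 then st.1 ++ [".{" ++ PySem.Int.toStr st.2 ++ "}"] else st.1
  String.join parts

-- ===== PORT B =====
-- Source B's re.sub("N+", …): scan left to right, replace each maximal run of 'N'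
-- by ".{len(run)}", copy every other character verbatim.
def nRunSub : List Char → String
  | [] => ""
  | c :: cs =>
    if c == 'N' then
      ".{" ++ PySem.Int.toStr (((cs.takeWhile (· == 'N')).length : Int) + 1) ++ "}"
        ++ nRunSub (cs.dropWhile (· == 'N'))
    else
      String.ofList [c] ++ nRunSub cs
termination_by l => l.length
decreasing_by
  · exact Nat.lt_succ_of_le (List.length_dropWhile_le _ _)
  · exact Nat.lt_succ_self _

def convert_n_to_regex_py_alt (pattern : String) : String := nRunSub pattern.toList

-- ===== PRECONDITION & SPEC =====
def Spec_convert_n_to_regex_py (pattern : String) (out : String) : Prop := out = convert_n_to_regex_py_alt pattern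
instance (pattern : String) (out : String) : Decidable (Spec_convert_n_to_regex_py pattern out) := by unfold Spec_convert_n_to_regex_py; infer_instance

-- ===== CLAIM (what is proved, stated in full; the proofs are below) =====
def Claim_equal_convert_n_to_regex_py : Prop := ∀ (pattern : String), Dom_convert_n_to_regex_py pattern → Spec_convert_n_to_regex_py pattern (convert_n_to_regex_py pattern)

-- ===== LEMMAS AND PROOFS =====

-- A's trailing flush, factored for the invariant
def flushRun (parts : List String) (k : Int) : List String :=
  if k > 0 then parts ++ [".{" ++ PySem.Int.toStr k ++ "}"] else parts

theorem join_foldl (l : List String) : ∀ a : String, l.foldl (· ++ ·) a = a ++ String.join l := by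
  induction l with
  | nil => intro a; simp [String.join]
  | cons s l ih =>
      intro a
      rw [List.foldl_cons, ih, show String.join (s :: l) = s ++ String.join l from by
        rw [String.join, List.foldl_cons, ih]; simp, String.append_assoc]

theorem join_append (l₁ l₂ : List String) :
    String.join (l₁ ++ l₂) = String.join l₁ ++ String.join l₂ := by
  rw [String.join, List.foldl_append, join_foldl, ← String.join]

theorem convertN_loop_eq (cs : List Char) : ∀ (parts : List String) (k : Int), 0 ≤ k →
    String.join (flushRun (cs.foldl convertNStep (parts, k)).1 (cs.foldl convertNStep (parts, k)).2)
    = String.join parts ++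
        (if 0 < k then
          ".{" ++ PySem.Int.toStr (k + ((cs.takeWhile (· == 'N')).length : Int)) ++ "}"
            ++ nRunSub (cs.dropWhile (· == 'N'))
        else nRunSub cs) := by
  induction cs with
  | nil =>
    intro parts k hk
    by_cases h : 0 < k
    · simp [flushRun, h, join_append, String.join, nRunSub]
    · simp [flushRun, h, nRunSub]
  | cons c cs ih =>
    intro parts k hk
    by_cases hc : c = 'N'
    · subst hc
      simp only [List.foldl_cons]
      rw [show convertNStep (parts, k) 'N' = (parts, k + 1) from by simp [convertNStep]]
      rw [ih parts (k + 1) (by omega)]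
      have hk1 : (0:Int) < k + 1 := by omega
      by_cases h : 0 < k
      · simp only [if_pos hk1, if_pos h, List.takeWhile_cons, List.dropWhile_cons,
          beq_self_eq_true, if_true, List.length_cons]
        rw [show k + 1 + ((cs.takeWhile (· == 'N')).length : Int)
              = k + (((cs.takeWhile (· == 'N')).length + 1 : Nat) : Int) from by push_cast; ring]
      · have hk0 : k = 0 := by omega
        subst hk0
        simp only [if_pos hk1, if_neg h, nRunSub, List.takeWhile_cons, List.dropWhile_cons,
          beq_self_eq_true, if_true, List.length_cons]
        rw [show (0:Int) + 1 + ((cs.takeWhile (· == 'N')).length : Int)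
              = ((cs.takeWhile (· == 'N')).length : Int) + 1 from by ring]
    · have hcb : (c == 'N') = false := by simp [hc]
      simp only [List.foldl_cons]
      rw [show convertNStep (parts, k) c = (flushRun parts k ++ [String.ofList [c]], 0) from by
        simp [convertNStep, flushRun, hc]]
      rw [ih _ 0 le_rfl]
      simp only [lt_irrefl, if_false, List.takeWhile_cons, List.dropWhile_cons, hcb,
        Bool.false_eq_true, List.length_nil]
      by_cases h : 0 < k
      · rw [if_pos h, show k + ((0:Nat) : Int) = k from by push_cast; ring]
        simp [flushRun, h, join_append, String.join, nRunSub, hcb, String.append_assoc]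
      · rw [if_neg h]
        simp [flushRun, h, join_append, String.join, nRunSub, hcb, String.append_assoc]

-- ===== VERDICT (by name: the statement is the Claim_ definition above) =====
theorem convert_n_to_regex_py_spec : Claim_equal_convert_n_to_regex_py := by
  intro pattern _
  show _ = _
  unfold convert_n_to_regex_py convert_n_to_regex_py_alt
  have h := convertN_loop_eq pattern.toList [] 0 le_rfl
  simp only [lt_irrefl, if_neg (lt_irrefl 0), String.join] at h
  simpa [flushRun, String.join] using h
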